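-- pv_equiv track=rewrite | github.com/weightless/rockpaperscissors | bots/historical_bot.py | get_x
-- ===== SOURCE A (Python) =====
-- def get_x(history):
--     x = []
--
--     for i in history:
--         if(i == "R"):
--             x.extend([1,0])
--         elif(i == "P"):
--             x.extend([0,1])
--         else:
--             x.extend([1,1])
--
--     return x
-- ===== SOURCE B (Python) =====
-- def get_x(history):
--     # Staged computation: build the two bit-streams separately, then interleave.
--     bits0 = [0 if c == "P" else 1 for c in history]
--     bits1 = [0 if c == "R" else 1 for c in history]
--     out = []
--     for pair in zip(bits0, bits1):
--         out += pair
--     return out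
-- ===== Notes on version B (the rewrite author's own statement) =====
-- stated objective: alternative
-- what changed: Replaces the single-pass three-way if/elif accumulator loop by three staged passes: one pass computing the low-bit stream (0 iff 'P'), one pass computing the high-bit stream (0 iff 'R'), then a zip-and-interleave pass assembling the output.
import Mathlib
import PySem

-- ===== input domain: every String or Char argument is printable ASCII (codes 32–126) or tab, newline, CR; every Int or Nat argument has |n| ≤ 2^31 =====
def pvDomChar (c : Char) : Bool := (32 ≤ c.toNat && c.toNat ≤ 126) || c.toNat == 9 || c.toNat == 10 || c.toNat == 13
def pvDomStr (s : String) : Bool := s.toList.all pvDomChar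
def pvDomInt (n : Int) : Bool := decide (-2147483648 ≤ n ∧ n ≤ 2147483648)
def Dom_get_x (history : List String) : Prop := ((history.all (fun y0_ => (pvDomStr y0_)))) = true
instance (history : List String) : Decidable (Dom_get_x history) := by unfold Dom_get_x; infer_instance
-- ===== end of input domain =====

-- B replaces A's single-pass if/elif accumulator loop by three staged passes: two bit-stream maps, then a zip-and-interleave pass (same cost, different decomposition).
-- ===== PORT A =====
def get_x (history : List String) : List Int :=
  history.foldl (fun x i =>
    if i = "R" then x ++ [1, 0]
    else if i = "P" then x ++ [0, 1]
    else x ++ [1, 1]) []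

-- ===== PORT B =====
def get_x_alt (history : List String) : List Int :=
  let bits0 := history.map (fun c => if c = "P" then (0 : Int) else 1)
  let bits1 := history.map (fun c => if c = "R" then (0 : Int) else 1)
  (bits0.zip bits1).foldl (fun out p => out ++ [p.1, p.2]) []

-- ===== PRECONDITION & SPEC =====
def Spec_get_x (history : List String) (out : List Int) : Prop := out = get_x_alt history
instance (history : List String) (out : List Int) : Decidable (Spec_get_x history out) := by unfold Spec_get_x; infer_instance

-- ===== CLAIM (what is proved, stated in full; the proofs are below) =====
def Claim_equal_get_x : Prop := ∀ (history : List String), Dom_get_x history → Spec_get_x history (get_x history)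

-- ===== LEMMAS AND PROOFS =====

-- Both sides are accumulator-append folds, so both equal a flatMap of their per-element block.
theorem get_x_eq_flatMap (history : List String) :
    get_x history = history.flatMap (fun i =>
      if i = "R" then [(1 : Int), 0] else if i = "P" then [0, 1] else [1, 1]) := by
  unfold get_x
  rw [show (fun (x : List Int) (i : String) =>
        if i = "R" then x ++ [1, 0]
        else if i = "P" then x ++ [0, 1]
        else x ++ [1, 1])
      = (fun (x : List Int) (i : String) =>
        x ++ (if i = "R" then [1, 0] else if i = "P" then [0, 1] else [1, 1])) from by
    funext x i; split_ifs <;> rfl]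
  simpa using PySem.List.foldl_append_eq_flatMap
    (fun i => if i = "R" then [(1 : Int), 0] else if i = "P" then [0, 1] else [1, 1]) history []

theorem get_x_alt_eq_flatMap (history : List String) :
    get_x_alt history = history.flatMap (fun i =>
      if i = "R" then [(1 : Int), 0] else if i = "P" then [0, 1] else [1, 1]) := by
  unfold get_x_alt
  simp only []
  rw [List.zip_map', PySem.List.foldl_append_eq_flatMap]
  simp only [List.nil_append, List.flatMap_map]
  induction history with
  | nil => rfl
  | cons c t ih =>
    simp only [List.flatMap_cons, ih]
    congr 1
    by_cases hR : c = "R"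
    · simp [hR]
    · by_cases hP : c = "P" <;> simp [hR, hP]

-- ===== VERDICT (by name: the statement is the Claim_ definition above) =====
theorem get_x_spec : Claim_equal_get_x := by
  intro history _
  show get_x history = get_x_alt history
  rw [get_x_eq_flatMap, get_x_alt_eq_flatMap]
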